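-- pv_equiv track=rewrite | github.com/pelavarre/byobash | bin/byotools.py | list_strip
-- ===== SOURCE A (Python) =====
-- def list_strip(items):  # todo: coin a name for "\n".join(items).strip().splitlines()
--     """Drop the leading and trailing Falsey Items"""
--
--     # Find the leftmost Truthy Item, else 0
--
--     index = 0
--     while items[index:]:
--         if items[index]:
--
--             break
--
--         index += 1
--
--     # Find the rightmost Truthy Item, else -1
--
--     rindex = -1
--     while items[:rindex]:
--         if items[rindex]:
--
--             break
--
--         rindex -= 1
--
--     # Drop the leading and trailing Falsey Items,
--     # by way of picking all the Items from leftmost through rightmost Truthy Item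
--
--     lstrip = items[index:]
--     strip = lstrip[: (rindex + 1)] if (rindex < -1) else lstrip
--
--     return strip
-- ===== SOURCE B (Python) =====
-- def list_strip(items):
--     """Drop the leading and trailing Falsey Items"""
--     out = list(items)
--     while out and not out[0]:
--         del out[0]
--     while out and not out[-1]:
--         out.pop()
--     return out
-- ===== Notes on version B (the rewrite author's own statement) =====
-- stated objective: simpler
-- what changed: B strips each end by repeatedly deleting a falsey end item from a copy of the list (two pop loops), instead of A's two index-hunting while-loops over slices followed by a slice with a negative right index.
import Mathlib
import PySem

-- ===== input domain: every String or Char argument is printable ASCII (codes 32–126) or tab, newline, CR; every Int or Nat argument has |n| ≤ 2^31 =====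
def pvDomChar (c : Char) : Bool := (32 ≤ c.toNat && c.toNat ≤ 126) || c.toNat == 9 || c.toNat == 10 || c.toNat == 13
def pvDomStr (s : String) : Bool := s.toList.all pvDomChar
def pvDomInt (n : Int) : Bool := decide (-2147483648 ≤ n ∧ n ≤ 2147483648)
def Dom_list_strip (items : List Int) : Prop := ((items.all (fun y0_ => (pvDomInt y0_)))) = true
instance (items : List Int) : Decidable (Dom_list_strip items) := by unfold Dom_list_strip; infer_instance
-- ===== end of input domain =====

-- B strips each end by repeatedly deleting a falsey end item from a copy, instead of
-- A's index-hunting while-loops plus slicing; objective: simpler (same cost).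

-- ===== PORT A =====

-- termination helper for the `index` while-loop: a nonempty tail slice means index < length
theorem pvSliceFromNeNil (items : List Int) (i : Nat)
    (h : PySem.List.slice items (some (i : Int)) ≠ []) : i < items.length := by
  rw [PySem.List.slice_from items (by omega : (0:Int) ≤ (i:Int))] at h
  simp at h
  omega

-- termination helper for the `rindex` while-loop: a nonempty head slice bounds rindex below
theorem pvSliceToNeNil (items : List Int) (r : Int)
    (h : PySem.List.slice items none (some r) ≠ []) : 0 < (items.length : Int) + r := by
  by_cases hr : 0 ≤ r
  · rw [PySem.List.slice_to items hr] at h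
    simp at h
    omega
  · have : PySem.List.slice items none (some r) = items.take ((items.length : Int) + r).toNat := by
      simp [PySem.List.slice, PySem.List.clampIdx]
      split_ifs <;> simp_all
      omega
    rw [this] at h
    simp at h
    omega

-- `index = 0; while items[index:]: if items[index]: break; index += 1`
def aFindIdx (items : List Int) (index : Nat) : Nat :=
  if h : PySem.List.slice items (some (index : Int)) ≠ [] then
    if PySem.List.pyGetD items (index : Int) 0 ≠ 0 then index
    else aFindIdx items (index + 1)
  else index
termination_by items.length - index
decreasing_by have := pvSliceFromNeNil items index h; omega

-- `rindex = -1; while items[:rindex]: if items[rindex]: break; rindex -= 1`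
def aFindR (items : List Int) (rindex : Int) : Int :=
  if h : PySem.List.slice items none (some rindex) ≠ [] then
    if PySem.List.pyGetD items rindex 0 ≠ 0 then rindex
    else aFindR items (rindex - 1)
  else rindex
termination_by ((items.length : Int) + rindex + 1).toNat
decreasing_by have := pvSliceToNeNil items rindex h; omega

def list_strip (items : List Int) : List Int :=
  let index := aFindIdx items 0
  let rindex := aFindR items (-1)
  let lstrip := PySem.List.slice items (some (index : Int))
  if rindex < -1 then PySem.List.slice lstrip none (some (rindex + 1)) else lstrip

-- ===== PORT B =====

-- `while out and not out[0]: del out[0]`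
def popLead : List Int → List Int
  | 0 :: rest => popLead rest
  | l => l

-- `while out and not out[-1]: out.pop()`
def popTrail (l : List Int) : List Int :=
  if h : l.getLast? = some 0 then popTrail l.dropLast
  else l
termination_by l.length
decreasing_by
  have hl : l ≠ [] := by intro hn; simp [hn] at h
  have := List.length_pos_iff.mpr hl
  simp [List.length_dropLast]
  omega

def list_strip_alt (items : List Int) : List Int := popTrail (popLead items)

-- ===== PRECONDITION & SPEC =====
def Spec_list_strip (items : List Int) (out : List Int) : Prop := out = list_strip_alt items
instance (items : List Int) (out : List Int) : Decidable (Spec_list_strip items out) := by unfold Spec_list_strip; infer_instance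

-- ===== CLAIM (what is proved, stated in full; the proofs are below) =====
def Claim_equal_list_strip : Prop := ∀ (items : List Int), Dom_list_strip items → Spec_list_strip items (list_strip items)

-- ===== LEMMAS AND PROOFS =====

-- B's first loop drops leading zeros
theorem popLead_eq_dropWhile (l : List Int) : popLead l = l.dropWhile (· == 0) := by
  induction l with
  | nil => simp [popLead]
  | cons a t ih =>
    by_cases ha : a = 0
    · subst ha; simpa [popLead] using ih
    · simp [popLead, ha]

-- B's second loop drops trailing zeros
theorem popTrail_eq (l : List Int) : popTrail l = (l.reverse.dropWhile (· == 0)).reverse := by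
  fun_induction popTrail l with
  | case1 l h ih =>
    rcases List.eq_nil_or_concat l with rfl | ⟨t, a, rfl⟩
    · simp at h
    · have ha : a = 0 := by simpa using h
      subst ha
      rw [ih]
      simp
  | case2 l h =>
    rcases List.eq_nil_or_concat l with rfl | ⟨t, a, rfl⟩
    · simp
    · have ha : ¬ (a = 0) := by simpa using h
      simp [ha]

-- dropWhile is drop of the takeWhile length
theorem dropWhile_eq_drop (l : List Int) (p : Int → Bool) :
    l.dropWhile p = l.drop (l.takeWhile p).length := by
  induction l with
  | nil => simp
  | cons a t ih =>
    by_cases hp : p a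
    · simpa [hp] using ih
    · simp [hp]

-- A's first loop: dropping from the found index is dropWhile
theorem aFindIdx_drop (items : List Int) (i : Nat) :
    items.drop (aFindIdx items i) = (items.drop i).dropWhile (· == 0) := by
  fun_induction aFindIdx items i with
  | case1 i h hnz =>
    have hi : i < items.length := pvSliceFromNeNil items i h
    have hget : PySem.List.pyGetD items (i : Int) 0 = items[i] := by
      rw [PySem.List.pyGetD_eq_getElem items 0 (by omega) (by exact_mod_cast hi)]
      simp
    rw [hget] at hnz
    rw [List.drop_eq_getElem_cons hi, List.dropWhile_cons_of_neg (by simp [hnz])]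
  | case2 i h hz ih =>
    have hi : i < items.length := pvSliceFromNeNil items i h
    have hget : PySem.List.pyGetD items (i : Int) 0 = items[i] := by
      rw [PySem.List.pyGetD_eq_getElem items 0 (by omega) (by exact_mod_cast hi)]
      simp
    rw [hget] at hz
    push_neg at hz
    rw [ih]
    conv_rhs => rw [List.drop_eq_getElem_cons hi, List.dropWhile_cons_of_pos (by simp [hz])]
  | case3 i h =>
    have hi : items.length ≤ i := by
      by_contra hc
      push_neg at hc
      apply h
      rw [PySem.List.slice_from items (by omega : (0:Int) ≤ (i:Int))]
      simp
      omega
    simp [List.drop_eq_nil_of_le hi]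

-- a negative-bound head slice is a take
theorem slice_to_neg (xs : List Int) (b : Int) (hb : b < 0) :
    PySem.List.slice xs none (some b) = xs.take ((xs.length : Int) + b).toNat := by
  simp [PySem.List.slice, PySem.List.clampIdx]
  split_ifs <;> simp_all
  omega

-- a long-enough all-p prefix forces a long takeWhile
theorem takeWhile_len_ge (p : Int → Bool) (l : List Int) (m : Nat) (hm : m ≤ l.length)
    (h : ∀ j (hj : j < m), p (l[j]'(by omega))) : m ≤ (l.takeWhile p).length := by
  induction l generalizing m with
  | nil => simpa using hm
  | cons a t ih =>
    cases m with
    | zero => simp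
    | succ m' =>
      have ha : p a := h 0 (by omega)
      simp [ha]
      exact ih m' (by simpa using hm) (fun j hj => h (j+1) (by omega))

-- a failing element bounds the takeWhile
theorem takeWhile_len_le (p : Int → Bool) (l : List Int) (m : Nat) (hm : m < l.length)
    (h : ¬ p (l[m]'(by omega))) : (l.takeWhile p).length ≤ m := by
  induction l generalizing m with
  | nil => simp at hm
  | cons a t ih =>
    cases m with
    | zero => by_cases ha : p a <;> simp_all
    | succ m' =>
      by_cases ha : p a
      · simp [ha]
        exact ih m' (by simpa using hm) (by simpa using h)
      · simp [ha]

-- Python's items[-k] for 1 ≤ k ≤ len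
theorem neg_get (items : List Int) (k : Nat) (h1 : 1 ≤ k) (h2 : k ≤ items.length) :
    PySem.List.pyGetD items (-(k:Int)) 0 = items[items.length - k]'(by omega) := by
  simp [PySem.List.pyGetD, PySem.List.pyGet?, PySem.List.pyIdx?]
  rw [if_neg (by omega), if_pos h2]
  simp [List.getElem?_eq_getElem (by omega : items.length - k < items.length)]

-- A's second loop: the negative index it finds, in terms of the trailing-zero count
theorem aFindR_eq (items : List Int) (k : Nat) (hk : 1 ≤ k) (hkn : k ≤ items.length)
    (hz : ∀ j, (hj : j < k - 1) → items.reverse[j]'(by simp; omega) = 0) :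
    aFindR items (-(k : Int)) =
      if (items.reverse.takeWhile (· == 0)).length = items.length
      then -(items.length : Int)
      else -(((items.reverse.takeWhile (· == 0)).length : Int) + 1) := by
  induction hn : items.length - k generalizing k with
  | zero =>
    have hkl : k = items.length := by omega
    rw [aFindR]
    rw [dif_neg (by
      rw [slice_to_neg items (-(k:Int)) (by omega)]
      simp
      omega)]
    have hge : items.length - 1 ≤ (items.reverse.takeWhile (· == 0)).length :=
      takeWhile_len_ge _ _ _ (by simp only [List.length_reverse]; omega)
        (fun j hj => by have := hz j (by omega); simp [this])
    have hle : (items.reverse.takeWhile (· == 0)).length ≤ items.length := by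
      simpa using List.IsPrefix.length_le (List.takeWhile_prefix (l := items.reverse) (· == 0))
    by_cases he : (items.reverse.takeWhile (· == 0)).length = items.length
    · rw [if_pos he]; omega
    · rw [if_neg he]; omega
  | succ m ih =>
    have hkl : k < items.length := by omega
    rw [aFindR]
    rw [dif_pos (by
      rw [slice_to_neg items (-(k:Int)) (by omega)]
      simp
      exact ⟨by omega, by intro hemp; subst hemp; simp at hkn; omega⟩)]
    rw [neg_get items k hk (by omega)]
    have hrev : items[items.length - k]'(by omega) = items.reverse[k-1]'(by simp; omega) := by
      rw [List.getElem_reverse]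
      congr 1
      omega
    by_cases hnz : items[items.length - k]'(by omega) ≠ 0
    · rw [if_pos hnz]
      have h1 : k - 1 ≤ (items.reverse.takeWhile (· == 0)).length :=
        takeWhile_len_ge _ _ _ (by simp; omega)
          (fun j hj => by have := hz j (by omega); simp [this])
      have hnz' : items.reverse[k-1]'(by simp; omega) ≠ 0 := by rw [← hrev]; exact hnz
      have h2 : (items.reverse.takeWhile (· == 0)).length ≤ k - 1 :=
        takeWhile_len_le _ _ _ (by simp only [List.length_reverse]; omega) (by simpa using hnz')
      have ht : (items.reverse.takeWhile (· == 0)).length = k - 1 := by omega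
      rw [if_neg (by omega)]
      rw [ht]
      omega
    · rw [if_neg hnz]
      push_neg at hnz
      have : -(k:Int) - 1 = -((k+1 : Nat) : Int) := by push_cast; ring
      rw [this]
      apply ih (k+1) (by omega) (by omega) _ (by omega)
      intro j hj
      by_cases hj' : j < k - 1
      · exact hz j hj'
      · have hjk : j = k - 1 := by omega
        subst hjk
        rw [← hrev]
        exact hnz

-- ===== VERDICT (by name: the statement is the Claim_ definition above) =====
theorem list_strip_spec : Claim_equal_list_strip := by
  intro items _
  unfold Spec_list_strip
  rw [list_strip_alt, popLead_eq_dropWhile, popTrail_eq]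
  rw [list_strip]
  have hidx : PySem.List.slice items (some ((aFindIdx items 0 : Nat) : Int))
      = items.dropWhile (· == 0) := by
    rw [PySem.List.slice_from items (by omega)]
    simpa using aFindIdx_drop items 0
  simp only [hidx]
  rcases eq_or_ne items [] with rfl | hne
  · -- empty list: both sides are []
    rw [aFindR, dif_neg (by rw [slice_to_neg [] (-1) (by omega)]; simp)]
    norm_num
  · have hlen : 1 ≤ items.length := List.length_pos_iff.mpr hne
    have hr : aFindR items (-1) =
        if (items.reverse.takeWhile (· == 0)).length = items.length
        then -(items.length : Int)
        else -(((items.reverse.takeWhile (· == 0)).length : Int) + 1) := by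
      have := aFindR_eq items 1 (le_refl 1) hlen (by intro j hj; omega)
      simpa using this
    set L := items.dropWhile (· == 0) with hL
    set t := (items.reverse.takeWhile (· == 0)).length with hT
    -- B's value is a take of L
    have hB : (L.reverse.dropWhile (· == 0)).reverse
        = L.take (L.length - (L.reverse.takeWhile (· == 0)).length) := by
      rw [dropWhile_eq_drop, List.drop_reverse, List.reverse_reverse]
    by_cases hall : t = items.length
    · -- every item falsey: both sides are []
      have hzall : ∀ x ∈ items, (x == 0) = true := by
        intro x hx
        have hpfx := List.takeWhile_prefix (l := items.reverse) (· == 0)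
        have := List.IsPrefix.eq_of_length hpfx (by simpa using hall)
        rw [List.takeWhile_eq_self_iff] at this
        exact this x (by simpa using hx)
      have hLnil : L = [] := by rw [hL, List.dropWhile_eq_nil_iff]; exact hzall
      rw [hB, hLnil, hr, if_pos hall]
      simp
      intro h2
      rw [slice_to_neg [] _ (by omega : -(items.length:Int) + 1 < 0)]
      simp
    · -- some item truthy: rindex = -(t+1); both sides are L.take (L.length - t)
      have hLne : L ≠ [] := by
        intro hnil
        apply hall
        rw [hL, List.dropWhile_eq_nil_iff] at hnil
        have : items.reverse.takeWhile (· == 0) = items.reverse := by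
          rw [List.takeWhile_eq_self_iff]
          intro x hx
          exact hnil x (by simpa using hx)
        rw [hT, this]
        simp
      -- the trailing-zero count of L equals that of items
      have hhead : ((L.head hLne) == 0) = false := List.head_dropWhile_not _ hLne
      have htw : L.reverse.takeWhile (· == 0) = items.reverse.takeWhile (· == 0) := by
        have hsplit : items.reverse = L.reverse ++ (items.take (items.takeWhile (· == 0)).length).reverse := by
          rw [hL, dropWhile_eq_drop, ← List.reverse_append, List.take_append_drop]
        rw [hsplit, List.takeWhile_append, if_neg]
        intro hfull
        have : L.reverse.takeWhile (· == 0) = L.reverse :=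
          List.IsPrefix.eq_of_length (List.takeWhile_prefix _) (by simpa using hfull)
        rw [List.takeWhile_eq_self_iff] at this
        have hmem : L.head hLne ∈ L.reverse := by simp [List.head_mem]
        have := this _ hmem
        rw [hhead] at this
        exact Bool.false_ne_true this
      have ht' : (L.reverse.takeWhile (· == 0)).length = t := by rw [htw]
      have htle : t < L.length := by
        rw [← ht']
        have hle := List.IsPrefix.length_le (List.takeWhile_prefix (l := L.reverse) (· == 0))
        simp only [List.length_reverse] at hle
        rcases lt_or_eq_of_le hle with h | h
        · exact h
        · exfalso
          have : L.reverse.takeWhile (· == 0) = L.reverse :=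
            List.IsPrefix.eq_of_length (List.takeWhile_prefix _) (by simpa using h)
          rw [List.takeWhile_eq_self_iff] at this
          have hmem : L.head hLne ∈ L.reverse := by simp [List.head_mem]
          have := this _ hmem
          rw [hhead] at this
          exact Bool.false_ne_true this
      rw [hB, ht', hr, if_neg hall]
      by_cases ht0 : t = 0
      · rw [if_neg (by omega), ht0]
        simp
      · rw [if_pos (by omega)]
        have harg : -((t:Int) + 1) + 1 = -(t:Int) := by ring
        rw [harg, slice_to_neg L (-(t:Int)) (by omega)]
        congr 1
        omega
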